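-- pv_equiv track=rewrite | github.com/mathix420/NimingCypher | NimingCypher/NimingCypher/GetWebText.py | tri_char
-- ===== SOURCE A (Python) =====
-- def tri_char(texte):
--     count= 0
--     counter=[]
--     liste_char = []
--     for ch in texte:                #Pour chaques caractères
--         if ch in liste_char:            #Si le caractère est contenu dans la liste de caractères
--             pos = liste_char.index(ch)      #obtient l'index du caractère dans la liste de caractères
--             counter[pos].append(count)      #ajoute la position du caractère dans la liste des positions
--         else:                           #Si le caractère n'existe pas dans la liste
--             liste_char.append(ch)           #Ajout du crarctère dans la liste
--             counter.append([count])         #Ajout de la position du caractère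
--         count+=1
--     return (liste_char, counter)    #retourn liste de caractères et liste d'occurences
-- ===== SOURCE B (Python) =====
-- def tri_char(texte):
--     chars = list(dict.fromkeys(texte))
--     return (chars, [[i for i, c in enumerate(texte) if c == ch] for ch in chars])
-- ===== Notes on version B (the rewrite author's own statement) =====
-- stated objective: simpler
-- what changed: Replaces A's single stateful pass over two coordinated parallel lists (membership test, list.index scan, indexed append) with two staged passes: first dedupe the text's characters in first-occurrence order via dict.fromkeys, then build each character's position list by a separate filtering comprehension over the enumerated text.
import Mathlib
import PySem

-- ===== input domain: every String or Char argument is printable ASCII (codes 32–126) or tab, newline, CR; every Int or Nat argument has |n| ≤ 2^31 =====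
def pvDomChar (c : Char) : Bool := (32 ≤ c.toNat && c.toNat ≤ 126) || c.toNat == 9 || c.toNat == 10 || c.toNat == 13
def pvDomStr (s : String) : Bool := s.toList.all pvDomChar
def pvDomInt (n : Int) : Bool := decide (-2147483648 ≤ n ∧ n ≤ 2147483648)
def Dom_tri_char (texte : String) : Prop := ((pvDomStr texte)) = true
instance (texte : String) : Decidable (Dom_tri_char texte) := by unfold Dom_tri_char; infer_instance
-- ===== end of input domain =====

-- B replaces A's single stateful pass over two coordinated parallel lists by two staged passes:
-- dedupe the characters in first-occurrence order, then a separate filtering pass per character;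
-- same cost class, but a plainer decomposition (objective: simpler).
-- Python's 1-character strings are represented as Char inside the computations and rendered as
-- 1-character Strings on return (same representation choice in both ports).

-- ===== PORT A =====
-- the loop of A: state (count, liste_char, counter), characters consumed left to right
def triAloop : List Char → Int → List Char → List (List Int) → List Char × List (List Int)
  | [], _, lc, counter => (lc, counter)
  | ch :: rest, count, lc, counter =>
      if ch ∈ lc then
        -- pos = liste_char.index(ch): cannot raise here since ch ∈ liste_char, so the getD 0 is unreachable
        let pos := (PySem.List.index? lc ch).getD 0
        -- counter[pos].append(count)
        triAloop rest (count + 1) lc (counter.modify pos (· ++ [count]))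
      else
        triAloop rest (count + 1) (lc ++ [ch]) (counter ++ [[count]])

def tri_char (texte : String) : List String × List (List Int) :=
  ((triAloop texte.toList 0 [] []).1.map (fun c => String.ofList [c]),
   (triAloop texte.toList 0 [] []).2)

-- ===== PORT B =====
def tri_char_alt (texte : String) : List String × List (List Int) :=
  -- chars = list(dict.fromkeys(texte))  : distinct characters in first-occurrence order
  let chars := PySem.Set.ofList texte.toList
  -- [[i for i, c in enumerate(texte) if c == ch] for ch in chars]
  (chars.map (fun c => String.ofList [c]),
   chars.map (fun ch =>
     ((PySem.List.enumerate texte.toList 0).filter (fun p => p.2 == ch)).map (·.1)))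

-- ===== PRECONDITION & SPEC =====
def Spec_tri_char (texte : String) (out : List String × List (List Int)) : Prop := out = tri_char_alt texte
instance (texte : String) (out : List String × List (List Int)) : Decidable (Spec_tri_char texte out) := by unfold Spec_tri_char; infer_instance

-- ===== CLAIM (what is proved, stated in full; the proofs are below) =====
def Claim_equal_tri_char : Prop := ∀ (texte : String), Dom_tri_char texte → Spec_tri_char texte (tri_char texte)

-- ===== LEMMAS AND PROOFS =====

-- positions (offset by count) at which c occurs in rest
def occEnum (rest : List Char) (count : Int) (c : Char) : List Int :=
  ((PySem.List.enumerate rest count).filter (fun p => p.2 == c)).map (·.1)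

theorem occEnum_nil (count : Int) (c : Char) : occEnum [] count c = [] := rfl

theorem occEnum_cons (ch : Char) (rest : List Char) (count : Int) (c : Char) :
    occEnum (ch :: rest) count c
      = (if ch = c then [count] else []) ++ occEnum rest (count + 1) c := by
  by_cases h : ch = c <;>
    simp [occEnum, PySem.List.enumerate_cons, h]

-- modifying the entry at the index of ch in a Nodup list, seen through a map
theorem map_modify_index (ch : Char) (g : List Int → List Int) :
    ∀ (lc : List Char) (f : Char → List Int) (i : Nat), lc.Nodup →
      PySem.List.index? lc ch = some i →
      (lc.map f).modify i g = lc.map (fun c => if c = ch then g (f c) else f c)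
  | [], _, _, _, hidx => by
      simp at hidx
  | a :: lc, f, i, hnd, hidx => by
      by_cases ha : a = ch
      · subst ha
        rw [PySem.List.index?_cons_self] at hidx
        injection hidx with hi
        subst hi
        rw [List.map_cons, List.modify_zero_cons, List.map_cons, if_pos rfl]
        congr 1
        apply List.map_congr_left
        intro c hc
        have hne : c ≠ a := by
          rintro rfl; exact (List.nodup_cons.mp hnd).1 hc
        rw [if_neg hne]
      · rw [PySem.List.index?_cons_of_ne lc ha] at hidx
        obtain ⟨j, hj, rfl⟩ := Option.map_eq_some_iff.mp hidx
        rw [List.map_cons, List.modify_succ_cons, List.map_cons, if_neg ha,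
            map_modify_index ch g lc f j (List.nodup_cons.mp hnd).2 hj]

-- characterization of A's loop when the counter is lc.map f (positions grouped per character)
theorem triAloop_char (rest : List Char) :
    ∀ (count : Int) (lc : List Char) (f : Char → List Int), lc.Nodup →
      triAloop rest count lc (lc.map f)
        = (PySem.Set.update lc rest,
           (PySem.Set.update lc rest).map
             (fun c => (if c ∈ lc then f c else []) ++ occEnum rest count c)) := by
  induction rest with
  | nil =>
      intro count lc f hnd
      simp only [triAloop, PySem.Set.update_nil]
      congr 1
      apply List.map_congr_left
      intro c hc
      simp [occEnum_nil, hc]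
  | cons ch rest ih =>
      intro count lc f hnd
      by_cases hmem : ch ∈ lc
      · obtain ⟨i, hidx⟩ : ∃ i, PySem.List.index? lc ch = some i :=
          Option.isSome_iff_exists.mp ((PySem.List.index?_isSome_iff _ _).mpr hmem)
        have step : triAloop (ch :: rest) count lc (lc.map f)
            = triAloop rest (count + 1) lc ((lc.map f).modify i (· ++ [count])) := by
          simp only [triAloop, if_pos hmem, hidx, Option.getD_some]
        rw [step, map_modify_index ch (· ++ [count]) lc f i hnd hidx,
            ih (count + 1) lc (fun c => if c = ch then f c ++ [count] else f c) hnd,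
            PySem.Set.update_cons, PySem.Set.add_of_mem hmem]
        congr 1
        apply List.map_congr_left
        intro c _
        rw [occEnum_cons]
        by_cases hch : c = ch
        · subst hch
          simp [hmem]
        · simp [hch, Ne.symm hch]
      · have hnd' : (lc ++ [ch]).Nodup := by
          rw [List.nodup_append]
          refine ⟨hnd, List.nodup_singleton ch, ?_⟩
          intro a ha b hb
          have hb' : b = ch := by simpa using hb
          subst hb'
          exact fun h => hmem (h ▸ ha)
        have hcnt : lc.map f ++ [[count]]
            = (lc ++ [ch]).map (fun c => if c = ch then [count] else f c) := by
          rw [List.map_append]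
          congr 1
          · apply List.map_congr_left
            intro c hc
            have : c ≠ ch := fun h => hmem (h ▸ hc)
            rw [if_neg this]
          · simp
        have step : triAloop (ch :: rest) count lc (lc.map f)
            = triAloop rest (count + 1) (lc ++ [ch]) (lc.map f ++ [[count]]) := by
          simp only [triAloop, if_neg hmem]
        rw [step, hcnt,
            ih (count + 1) (lc ++ [ch]) (fun c => if c = ch then [count] else f c) hnd',
            PySem.Set.update_cons, PySem.Set.add_of_not_mem hmem]
        congr 1
        apply List.map_congr_left
        intro c _
        rw [occEnum_cons]
        by_cases hch : c = ch
        · subst hch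
          simp [hmem]
        · simp [List.mem_append, hch, Ne.symm hch]

-- ===== VERDICT (by name: the statement is the Claim_ definition above) =====
theorem tri_char_spec : Claim_equal_tri_char := by
  intro texte _
  unfold Spec_tri_char tri_char tri_char_alt
  have hA := triAloop_char texte.toList 0 [] (fun _ => ([] : List Int)) List.nodup_nil
  simp only [List.map_nil, List.not_mem_nil, if_false, List.nil_append,
             PySem.Set.update_nil_left] at hA
  rw [hA]
  rfl
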